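-- pv_equiv track=rewrite | github.com/leohsuofnthu/Chem-SMC | src/smc_generate.py | _is_valid_partial_smiles
-- ===== SOURCE A (Python) =====
-- def _is_valid_partial_smiles(smiles: str) -> bool:
--     """Check if a partial SMILES string is potentially valid (not complete but structurally sound)."""
--     if not smiles:
--         return False
--
--     # Basic checks for partial SMILES validity
--     # Check for balanced parentheses and brackets
--     paren_count = smiles.count('(') - smiles.count(')')
--     bracket_count = smiles.count('[') - smiles.count(']')
--
--     # Allow some imbalance for partial strings
--     if abs(paren_count) > 2 or abs(bracket_count) > 2:
--         return False
--
--     # Check for obviously invalid patterns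
--     invalid_patterns = ['@@', '##', '++', '--', '==']
--     for pattern in invalid_patterns:
--         if pattern in smiles:
--             return False
--
--     return True
-- ===== SOURCE B (Python) =====
-- def _is_valid_partial_smiles(smiles: str) -> bool:
--     """Check if a partial SMILES string is potentially valid (not complete but structurally sound)."""
--     if not smiles:
--         return False
--     paren = 0
--     bracket = 0
--     prev = None
--     for ch in smiles:
--         if ch == prev and ch in ('@', '#', '+', '-', '='):
--             return False
--         if ch == '(':
--             paren += 1
--         elif ch == ')':
--             paren -= 1
--         elif ch == '[':
--             bracket += 1
--         elif ch == ']':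
--             bracket -= 1
--         prev = ch
--     return abs(paren) <= 2 and abs(bracket) <= 2
-- ===== Notes on version B (the rewrite author's own statement) =====
-- stated objective: alternative
-- what changed: Replaced A's several separate scans (four .count calls and five substring searches) by one single pass that keeps running paren/bracket balances and detects a doubled operator by comparing each character with its predecessor, exiting early on the first doubled operator; in CPython the interpreted loop is not faster than A's C built-ins.
import Mathlib
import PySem

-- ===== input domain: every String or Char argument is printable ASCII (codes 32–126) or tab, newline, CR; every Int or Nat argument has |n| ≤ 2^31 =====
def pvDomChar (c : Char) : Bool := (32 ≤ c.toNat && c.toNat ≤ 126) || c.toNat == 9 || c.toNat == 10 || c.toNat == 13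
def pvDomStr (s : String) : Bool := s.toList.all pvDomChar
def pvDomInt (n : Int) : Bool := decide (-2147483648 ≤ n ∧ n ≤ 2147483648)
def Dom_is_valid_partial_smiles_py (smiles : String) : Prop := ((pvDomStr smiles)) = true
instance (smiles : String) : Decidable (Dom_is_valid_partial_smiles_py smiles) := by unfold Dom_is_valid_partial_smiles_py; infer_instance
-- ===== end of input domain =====

-- B replaces A's several separate scans of the string (four .count calls and five
-- substring searches) by one single pass with running balances and a
-- previous-character comparison, exiting early on the first doubled operator
-- (a different traversal of the same O(n) cost, not claimed faster).

-- ===== PORT A =====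
def is_valid_partial_smiles_py (smiles : String) : Bool :=
  if smiles == "" then false
  else
    let paren_count : Int := (PySem.Str.count smiles "(" : Int) - (PySem.Str.count smiles ")" : Int)
    let bracket_count : Int := (PySem.Str.count smiles "[" : Int) - (PySem.Str.count smiles "]" : Int)
    if 2 < paren_count.natAbs ∨ 2 < bracket_count.natAbs then false
    else
      let invalid_patterns : List String := ["@@", "##", "++", "--", "=="]
      -- 'for pattern in invalid_patterns: if pattern in smiles: return False'
      if invalid_patterns.any (fun p => PySem.Str.isIn p smiles) then false
      else true

-- ===== PORT B =====
def pvAltLoop (prev : Option Char) (paren bracket : Int) : List Char → Bool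
  | [] => decide (paren.natAbs ≤ 2) && decide (bracket.natAbs ≤ 2)
  | ch :: rest =>
    if (some ch == prev) && (ch == '@' || ch == '#' || ch == '+' || ch == '-' || ch == '=') then
      false
    else
      pvAltLoop (some ch)
        (if ch == '(' then paren + 1 else if ch == ')' then paren - 1 else paren)
        (if ch == '[' then bracket + 1 else if ch == ']' then bracket - 1 else bracket)
        rest

def is_valid_partial_smiles_py_alt (smiles : String) : Bool :=
  if smiles == "" then false
  else pvAltLoop none 0 0 smiles.toList

-- ===== PRECONDITION & SPEC =====
def Spec_is_valid_partial_smiles_py (smiles : String) (out : Bool) : Prop :=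
  out = is_valid_partial_smiles_py_alt smiles
instance (smiles : String) (out : Bool) : Decidable (Spec_is_valid_partial_smiles_py smiles out) := by
  unfold Spec_is_valid_partial_smiles_py; infer_instance

-- ===== CLAIM =====
def Claim_equal_is_valid_partial_smiles_py : Prop :=
  ∀ (smiles : String), Dom_is_valid_partial_smiles_py smiles →
    Spec_is_valid_partial_smiles_py smiles (is_valid_partial_smiles_py smiles)

-- ===== LEMMAS AND PROOFS =====

def pvIsOp (c : Char) : Bool := c == '@' || c == '#' || c == '+' || c == '-' || c == '='

def pvHasDbl : Option Char → List Char → Bool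
  | _, [] => false
  | prev, c :: rest => ((some c == prev) && pvIsOp c) || pvHasDbl (some c) rest

lemma pv_countgo_singleton (c : Char) :
    ∀ (fuel : Nat) (l : List Char) (acc : Nat), l.length ≤ fuel →
      PySem.Chars.count.go [c] fuel l acc = acc + l.count c := by
  intro fuel
  induction fuel with
  | zero =>
    intro l acc h
    obtain rfl : l = [] := List.length_eq_zero_iff.mp (Nat.le_zero.mp h)
    simp [PySem.Chars.count.go]
  | succ fuel ih =>
    intro l acc h
    cases l with
    | nil => simp [PySem.Chars.count.go]
    | cons a t =>
      have h' : t.length ≤ fuel := by simpa using h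
      show (if [c].isPrefixOf (a :: t) = true then
              PySem.Chars.count.go [c] fuel (List.drop [c].length (a :: t)) (acc + 1)
            else PySem.Chars.count.go [c] fuel t acc) = acc + (a :: t).count c
      by_cases hca : c = a
      · subst hca
        simp only [List.isPrefixOf, BEq.rfl, Bool.true_and, List.isPrefixOf_nil_left,
          if_true, List.length_cons, List.length_nil, List.drop_succ_cons, List.drop_zero]
        rw [ih t (acc + 1) h']
        simp [List.count_cons]
        omega
      · have hba : (c == a) = false := by simpa using hca
        simp only [List.isPrefixOf, hba, Bool.false_and, Bool.false_eq_true, if_false]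
        rw [ih t acc h']
        simp [List.count_cons]
        exact fun h => hca h.symm

lemma pv_count_singleton (s : String) (t : String) (c : Char) (h : t.toList = [c]) :
    PySem.Str.count s t = s.toList.count c := by
  rw [PySem.Str.count_eq, h]
  simp only [PySem.Chars.count, List.isEmpty_cons, Bool.false_eq_true, if_false]
  rw [pv_countgo_singleton c s.toList.length s.toList 0 (le_refl _)]
  simp

lemma pv_singleton_prefix (c : Char) (t : List Char) :
    [c] <+: t ↔ t.head? = some c := by
  cases t <;> simp [List.cons_prefix_cons, eq_comm]

lemma pv_dbl_iff (l : List Char) : ∀ prev,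
    pvHasDbl prev l = true ↔
      ∃ c, pvIsOp c = true ∧ ((prev = some c ∧ l.head? = some c) ∨ [c, c] <:+: l) := by
  induction l with
  | nil =>
    intro prev
    simp [pvHasDbl]
  | cons a t ih =>
    intro prev
    simp only [pvHasDbl, Bool.or_eq_true, Bool.and_eq_true, beq_iff_eq, ih, List.head?_cons]
    constructor
    · rintro (⟨hpa, hop⟩ | ⟨c, hop, ⟨hc1, hc2⟩ | hinf⟩)
      · exact ⟨a, hop, Or.inl ⟨hpa.symm, rfl⟩⟩
      · exact ⟨c, hop, Or.inr (List.IsPrefix.isInfix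
          (List.cons_prefix_cons.mpr ⟨(Option.some.inj hc1).symm, (pv_singleton_prefix c t).mpr hc2⟩))⟩
      · exact ⟨c, hop, Or.inr (List.infix_cons hinf)⟩
    · rintro ⟨c, hop, ⟨hc1, hc2⟩ | hinf⟩
      · have hac : a = c := Option.some.inj hc2
        exact Or.inl ⟨by rw [hac, hc1], by rw [hac]; exact hop⟩
      · rcases List.infix_cons_iff.mp hinf with hpre | hinf'
        · obtain ⟨hca, h2⟩ := List.cons_prefix_cons.mp hpre
          exact Or.inr ⟨c, hop, Or.inl ⟨congrArg some hca.symm,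
            (pv_singleton_prefix c t).mp h2⟩⟩
        · exact Or.inr ⟨c, hop, Or.inr hinf'⟩

lemma pv_loop_eq (l : List Char) : ∀ (prev : Option Char) (p b : Int),
    pvAltLoop prev p b l =
      if pvHasDbl prev l then false
      else decide ((p + ((l.count '(' : Int) - (l.count ')' : Int))).natAbs ≤ 2)
        && decide ((b + ((l.count '[' : Int) - (l.count ']' : Int))).natAbs ≤ 2) := by
  induction l with
  | nil =>
    intro prev p b
    simp [pvAltLoop, pvHasDbl]
  | cons a t ih =>
    intro prev p b
    by_cases hc : ((some a == prev) && (a == '@' || a == '#' || a == '+' || a == '-' || a == '=')) = true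
    · simp [pvAltLoop, pvHasDbl, pvIsOp, hc]
    · simp only [Bool.not_eq_true] at hc
      rw [show pvAltLoop prev p b (a :: t) =
          pvAltLoop (some a)
            (if a == '(' then p + 1 else if a == ')' then p - 1 else p)
            (if a == '[' then b + 1 else if a == ']' then b - 1 else b) t from by
        simp [pvAltLoop, hc], ih]
      have hd : pvHasDbl prev (a :: t) = pvHasDbl (some a) t := by
        simp [pvHasDbl, pvIsOp, hc]
      rw [hd]
      have hp : (if a == '(' then p + 1 else if a == ')' then p - 1 else p)
          + ((t.count '(' : Int) - (t.count ')' : Int))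
          = p + (((a :: t).count '(' : Int) - ((a :: t).count ')' : Int)) := by
        by_cases h1 : a = '(' <;> by_cases h2 : a = ')' <;>
          simp [h1, h2, List.count_cons] <;> push_cast <;> omega
      have hb : (if a == '[' then b + 1 else if a == ']' then b - 1 else b)
          + ((t.count '[' : Int) - (t.count ']' : Int))
          = b + (((a :: t).count '[' : Int) - ((a :: t).count ']' : Int)) := by
        by_cases h1 : a = '[' <;> by_cases h2 : a = ']' <;>
          simp [h1, h2, List.count_cons] <;> push_cast <;> omega
      rw [hp, hb]

lemma pv_patterns_eq (s : String) :
    (["@@", "##", "++", "--", "=="].any (fun p => PySem.Str.isIn p s)) = pvHasDbl none s.toList := by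
  rw [Bool.eq_iff_iff]
  simp only [List.any_cons, List.any_nil, Bool.or_eq_true, Bool.false_eq_true, or_false,
    PySem.Str.isIn_iff_infix, pv_dbl_iff,
    show ("@@" : String).toList = ['@', '@'] from rfl,
    show ("##" : String).toList = ['#', '#'] from rfl,
    show ("++" : String).toList = ['+', '+'] from rfl,
    show ("--" : String).toList = ['-', '-'] from rfl,
    show ("==" : String).toList = ['=', '='] from rfl]
  constructor
  · rintro (h | h | h | h | h)
    · exact ⟨'@', rfl, Or.inr h⟩
    · exact ⟨'#', rfl, Or.inr h⟩
    · exact ⟨'+', rfl, Or.inr h⟩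
    · exact ⟨'-', rfl, Or.inr h⟩
    · exact ⟨'=', rfl, Or.inr h⟩
  · rintro ⟨c, hop, ⟨hc1, _⟩ | hinf⟩
    · exact absurd hc1 (by simp)
    · simp only [pvIsOp, Bool.or_eq_true, beq_iff_eq] at hop
      rcases hop with (((rfl | rfl) | rfl) | rfl) | rfl
      · exact Or.inl hinf
      · exact Or.inr (Or.inl hinf)
      · exact Or.inr (Or.inr (Or.inl hinf))
      · exact Or.inr (Or.inr (Or.inr (Or.inl hinf)))
      · exact Or.inr (Or.inr (Or.inr (Or.inr hinf)))

-- ===== VERDICT =====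
theorem is_valid_partial_smiles_py_spec : Claim_equal_is_valid_partial_smiles_py := by
  unfold Claim_equal_is_valid_partial_smiles_py
  intro smiles _
  show is_valid_partial_smiles_py smiles = is_valid_partial_smiles_py_alt smiles
  unfold is_valid_partial_smiles_py is_valid_partial_smiles_py_alt
  by_cases hs : (smiles == "") = true
  · simp [hs]
  · simp only [Bool.not_eq_true] at hs
    simp only [hs, Bool.false_eq_true, if_false]
    rw [pv_loop_eq]
    simp only [pv_count_singleton smiles "(" '(' rfl, pv_count_singleton smiles ")" ')' rfl,
      pv_count_singleton smiles "[" '[' rfl, pv_count_singleton smiles "]" ']' rfl,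
      pv_patterns_eq, zero_add]
    set pa := ((smiles.toList.count '(' : Int) - (smiles.toList.count ')' : Int)) with hpa
    set ba := ((smiles.toList.count '[' : Int) - (smiles.toList.count ']' : Int)) with hba
    cases hdb : pvHasDbl none smiles.toList <;>
      by_cases hA : pa.natAbs ≤ 2 <;> by_cases hB : ba.natAbs ≤ 2 <;>
      simp [hdb, hA, hB] <;> omega
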